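-- pv_equiv track=rewrite | github.com/acotto-san/FCC-Python-BudgetApp | budget.py | add_category_names
-- ===== SOURCE A (Python) =====
-- def add_category_names(category_names_list):
--     category_names_lines = ""
--     padding = "    "
--
--     for i in range(len(max(category_names_list, key=len))):
--
--         category_names_lines += padding
--
--         for name in category_names_list:
--             if i < len(name):
--                 category_names_lines += " {} ".format(name[i])
--             else:
--                 category_names_lines += "   "
--
--         if i != len(max(category_names_list, key=len))-1:
--             category_names_lines += " \n"
--         else:
--             category_names_lines += " "
--
--     return category_names_lines
-- ===== SOURCE B (Python) =====
-- def add_category_names(category_names_list):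
--     width = max(len(name) for name in category_names_list)
--     padded = [name.ljust(width) for name in category_names_list]
--     lines = ["    " + "".join(" {} ".format(c) for c in row) + " "
--              for row in zip(*padded)]
--     return "\n".join(lines)
-- ===== Notes on version B (the rewrite author's own statement) =====
-- stated objective: idiomatic
-- what changed: B pads every name to the max length and transposes with zip(*padded), emitting whole rows by join, instead of A's index loop with a per-character length test and conditional newline appending to one accumulator string.
import Mathlib
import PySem

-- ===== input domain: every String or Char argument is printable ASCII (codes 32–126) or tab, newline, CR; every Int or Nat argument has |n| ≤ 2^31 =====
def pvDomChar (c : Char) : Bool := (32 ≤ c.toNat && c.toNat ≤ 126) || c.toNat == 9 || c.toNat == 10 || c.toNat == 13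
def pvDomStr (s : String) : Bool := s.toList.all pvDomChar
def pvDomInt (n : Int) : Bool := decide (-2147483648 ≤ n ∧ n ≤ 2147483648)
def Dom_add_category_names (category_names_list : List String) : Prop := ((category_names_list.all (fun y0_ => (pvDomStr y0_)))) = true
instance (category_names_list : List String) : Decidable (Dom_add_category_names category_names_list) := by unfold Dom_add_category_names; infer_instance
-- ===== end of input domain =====

-- B pads names to the max length and transposes (zip(*padded)) building whole rows joined by '\n',
-- instead of A's index loop with a per-char bounds test and conditional newline; idiomatic, same cost.


-- ===== PORT A =====
-- Strings are handled as code-point lists (PySem.Chars style, exact on the domain); the result is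
-- String.mk of the accumulated characters, exactly the string A builds by '+='.
-- max(category_names_list, key=len) = PySem.List.max? … (·.length); the getD [] is unreachable under Pre_ (list nonempty).
def add_category_names (category_names_list : List String) : String :=
  let names := category_names_list.map String.toList
  let n := ((PySem.List.max? names (fun x => x.length)).getD []).length
  String.mk <|
    (PySem.List.pyRange 0 (n : Int) 1).foldl (fun acc i =>
      let acc := acc ++ "    ".toList
      let acc := names.foldl (fun a name =>
        if i < (name.length : Int) then
          a ++ [' ', PySem.List.pyGetD name i ' ', ' ']   -- " {} ".format(name[i]); 0 ≤ i < len(name) so pyGetD is exact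
        else
          a ++ [' ', ' ', ' ']) acc                        -- "   "
      if i ≠ (n : Int) - 1 then acc ++ [' ', '\n'] else acc ++ [' ']) []

-- ===== PORT B =====
-- zipStar is the literal port of Python's zip(*rows): take heads while every list is nonempty.
def zipStar (L : List (List Char)) : List (List Char) :=
  if h : L ≠ [] ∧ L.all (· ≠ []) then
    -- h is used by the decreasing_by proof
    L.map (·.headD ' ') :: zipStar (L.map (·.tail))
  else []
termination_by (L.map List.length).sum
decreasing_by
  rcases h with ⟨hne, hall⟩
  simp only [List.map_map, Function.comp_def, List.attach_map_val]
  rcases L with _ | ⟨x, xs⟩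
  · exact absurd rfl hne
  · simp only [List.all_cons, Bool.and_eq_true, decide_eq_true_eq] at hall
    simp only [List.map_cons, List.sum_cons]
    have hx : x.tail.length < x.length := by
      cases x with
      | nil => exact absurd rfl hall.1
      | cons a t => simp
    have h2 : ((xs.map (fun y => y.tail.length)).sum ≤ (xs.map List.length).sum) := by
      apply List.sum_le_sum
      intro a _
      simp [List.length_tail]
    omega

def add_category_names_alt (category_names_list : List String) : String :=
  let names := category_names_list.map String.toList
  let width := (PySem.List.max? (names.map List.length) (fun x => x)).getD 0   -- max(len(name) for name in …)
  let padded := names.map (fun name => name ++ List.replicate (width - name.length) ' ')  -- name.ljust(width)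
  let lines := (zipStar padded).map (fun row =>
    "    ".toList ++ row.flatMap (fun c => [' ', c, ' ']) ++ [' '])  -- "    " + "".join(" {} ".format(c) for c in row) + " "
  String.mk (PySem.Chars.join ['\n'] lines)

-- ===== PRECONDITION & SPEC =====
-- Pre_ excludes only the empty list, on which both A and B raise ValueError (max of an empty sequence).
def Pre_add_category_names (category_names_list : List String) : Prop := category_names_list ≠ []
instance (category_names_list : List String) : Decidable (Pre_add_category_names category_names_list) := by unfold Pre_add_category_names; infer_instance
def pvWitness_add_category_names : List String := (["Food", "Fun"])

def Spec_add_category_names (category_names_list : List String) (out : String) : Prop := out = add_category_names_alt category_names_list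
instance (category_names_list : List String) (out : String) : Decidable (Spec_add_category_names category_names_list out) := by unfold Spec_add_category_names; infer_instance

-- ===== CLAIM (what is proved, stated in full; the proofs are below) =====
def Claim_equal_add_category_names : Prop := ∀ (category_names_list : List String), Dom_add_category_names category_names_list → Pre_add_category_names category_names_list → Spec_add_category_names category_names_list (add_category_names category_names_list)

-- ===== LEMMAS AND PROOFS =====

-- the k-th output row (without the trailing newline), shared normal form of both ports
def pvRow (names : List (List Char)) (k : Nat) : List Char :=
  "    ".toList ++
  names.flatMap (fun name => if k < name.length then [' ', name.getD k ' ', ' '] else [' ', ' ', ' ']) ++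
  [' ']

-- the key of Python's max(xs, key) is max over the mapped keys (first argmax on both sides)
lemma max?_map_key {α : Type} (xs : List α) (key : α → Nat) :
    (PySem.List.max? xs key).map key = PySem.List.max? (xs.map key) (fun x => x) := by
  unfold PySem.List.max?
  suffices h : ∀ (acc : Option α),
      (xs.foldl (fun acc x => match acc with
        | none => some x
        | some m => if key m < key x then some x else some m) acc).map key
      = (xs.map key).foldl (fun acc x => match acc with
        | none => some x
        | some m => if m < x then some x else some m) (acc.map key) by
    convert h none using 2
    funext acc x
    cases acc <;> rfl
  induction xs with
  | nil => intro acc; rfl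
  | cons y ys ih =>
    intro acc
    cases acc with
    | none => simpa using ih (some y)
    | some m =>
      simp only [List.foldl_cons, List.map_cons]
      by_cases hk : key m < key y
      · simp [hk, ih]
      · simp [hk, ih]

-- zipStar on a nonempty list of equal-length lists is the row-by-row transpose
lemma zipStar_uniform (w : Nat) : ∀ (L : List (List Char)), L ≠ [] →
    (∀ x ∈ L, x.length = w) →
    zipStar L = (List.range w).map (fun i => L.map (fun x => x.getD i ' ')) := by
  induction w with
  | zero =>
    intro L hne hlen
    rw [zipStar, dif_neg]
    · simp
    · rintro ⟨_, h2⟩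
      rcases L with _ | ⟨x, xs⟩
      · exact hne rfl
      · have hx : x = [] := List.eq_nil_of_length_eq_zero (hlen x (by simp))
        simp [hx] at h2
  | succ w ih =>
    intro L hne hlen
    have hall : L.all (· ≠ []) = true := by
      rw [List.all_eq_true]
      intro x hx
      have hx' := hlen x hx
      simp only [decide_eq_true_eq]
      intro hnil
      rw [hnil] at hx'
      simp at hx'
    rw [zipStar, dif_pos ⟨hne, hall⟩]
    have htne : L.map List.tail ≠ [] := by simpa using hne
    have htlen : ∀ y ∈ L.map List.tail, y.length = w := by
      intro y hy
      rcases List.mem_map.mp hy with ⟨x, hx, rfl⟩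
      have := hlen x hx
      simp [List.length_tail, this]
    rw [ih _ htne htlen, List.range_succ_eq_map]
    simp only [List.map_cons, List.map_map]
    congr 1
    · apply List.map_congr_left
      intro x hx
      have hx' := hlen x hx
      cases x with
      | nil => simp at hx'
      | cons a t => simp
    · apply List.map_congr_left
      intro i _
      apply List.map_congr_left
      intro x hx
      have hx' := hlen x hx
      cases x with
      | nil => simp at hx'
      | cons a t => simp [List.getD]

-- join with '\n' of parts ++ [x] in flatMap form
lemma join_snoc (x : List Char) : ∀ (parts : List (List Char)),
    PySem.Chars.join ['\n'] (parts ++ [x]) = parts.flatMap (· ++ ['\n']) ++ x := by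
  intro parts
  induction parts with
  | nil => simp [PySem.Chars.join_singleton]
  | cons p ps ih =>
    cases ps with
    | nil => simp [PySem.Chars.join_cons_cons, PySem.Chars.join_singleton]
    | cons q rest =>
      simp only [List.cons_append, PySem.Chars.join_cons_cons]
      rw [show q :: (rest ++ [x]) = (q :: rest) ++ [x] from rfl, ih]
      simp [List.append_assoc]

-- getD into a space-padded name: the pad (and anything beyond it) reads as a space
lemma padGetD (name : List Char) (k w : Nat) :
    (name ++ List.replicate (w - name.length) ' ').getD k ' ' =
      if k < name.length then name.getD k ' ' else ' ' := by
  by_cases h : k < name.length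
  · simp [h, List.getD_eq_getElem?_getD, List.getElem?_append_left h]
  · simp only [h, if_false, List.getD_eq_getElem?_getD,
      List.getElem?_append_right (Nat.le_of_not_lt h), List.getElem?_replicate]
    split_ifs <;> simp

-- A's accumulator loop over range (n'+1) with conditional separator is join '\n' of the rows
lemma foldl_join (row : Nat → List Char) (n' : Nat) :
    (List.range (n' + 1)).foldl
        (fun acc k => acc ++ (row k ++ if k ≠ n' then ['\n'] else [])) []
    = PySem.Chars.join ['\n'] ((List.range (n' + 1)).map row) := by
  rw [PySem.List.foldl_append_eq_flatMap (fun k => row k ++ if k ≠ n' then ['\n'] else []) _ []]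
  rw [List.range_succ, List.flatMap_append, List.map_append]
  simp only [List.flatMap_cons, List.flatMap_nil, List.map_cons, List.map_nil, List.append_nil,
    ne_eq, not_true_eq_false, if_false]
  rw [join_snoc, List.nil_append]
  congr 1
  rw [List.flatMap_map]
  apply List.flatMap_congr
  intro k hk
  have hk' : k ≠ n' := Nat.ne_of_lt (List.mem_range.mp hk)
  simp [hk']

-- ===== VERDICT (by name: the statement is the Claim_ definition above) =====
theorem add_category_names_spec : Claim_equal_add_category_names := by
  intro l _hdom hpre
  unfold Pre_add_category_names at hpre
  simp only [Spec_add_category_names, add_category_names, add_category_names_alt]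
  set names := l.map String.toList with hnames
  have hne : names ≠ [] := by simp [hnames, hpre]
  obtain ⟨m, hm⟩ : ∃ m, PySem.List.max? names (fun x => x.length) = some m := by
    cases h : PySem.List.max? names (fun x => x.length) with
    | none => exact absurd ((PySem.List.max?_eq_none_iff _ _).mp h) hne
    | some m => exact ⟨m, rfl⟩
  have hw : PySem.List.max? (names.map List.length) (fun x => x) = some m.length := by
    have h2 := max?_map_key names (fun x => x.length)
    rw [hm] at h2
    simpa using h2.symm
  have hub : ∀ x ∈ names, x.length ≤ m.length := fun x hx => PySem.List.max?_isMax hm x hx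
  rw [hm, hw]
  simp only [Option.getD_some]
  refine congrArg String.mk ?_
  have hplen : ∀ x ∈ names.map (fun name => name ++ List.replicate (m.length - name.length) ' '),
      x.length = m.length := by
    intro x hx
    rcases List.mem_map.mp hx with ⟨name, hname, rfl⟩
    have := hub name hname
    simp only [List.length_append, List.length_replicate]
    omega
  have hpne : names.map (fun name => name ++ List.replicate (m.length - name.length) ' ') ≠ [] := by
    simpa using hne
  rw [zipStar_uniform m.length _ hpne hplen]
  -- B side: each transposed row renders as pvRow
  have hB : (List.map (fun row => "    ".toList ++ List.flatMap (fun c => [' ', c, ' ']) row ++ [' '])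
        ((List.range m.length).map (fun i =>
          (names.map (fun name => name ++ List.replicate (m.length - name.length) ' ')).map
            (fun x => x.getD i ' '))))
      = (List.range m.length).map (pvRow names) := by
    rw [List.map_map]
    apply List.map_congr_left
    intro k _
    simp only [Function.comp_apply, List.map_map, List.flatMap_map]
    unfold pvRow
    congr 1
    congr 1
    apply List.flatMap_congr
    intro name _
    rw [padGetD, apply_ite (fun c => [' ', c, ' '])]
  rw [hB]
  -- A side
  rw [PySem.List.pyRange_zero_nat m.length, List.foldl_map]
  rcases Nat.eq_zero_or_pos m.length with hz | hpos
  · simp only [hz]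
    simp [PySem.Chars.join_nil]
  · obtain ⟨n', hn'⟩ : ∃ n', m.length = n' + 1 := ⟨m.length - 1, by omega⟩
    rw [PySem.List.foldl_congr_mem _ _
      (fun acc k => acc ++ (pvRow names k ++ if k ≠ n' then ['\n'] else [])) []
      ?_]
    · rw [hn', foldl_join]
    · intro acc k hk
      have hk' : k < m.length := List.mem_range.mp hk
      have hfun : (fun (a : List Char) (name : List Char) =>
            if (k : Int) < (name.length : Int) then a ++ [' ', PySem.List.pyGetD name (k : Int) ' ', ' ']
            else a ++ [' ', ' ', ' '])
          = fun a name => a ++ (if k < name.length then [' ', name.getD k ' ', ' '] else [' ', ' ', ' ']) := by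
        funext a name
        by_cases hc : k < name.length
        · have hc' : (k : Int) < (name.length : Int) := by exact_mod_cast hc
          simp [hc, hc', PySem.List.pyGetD_natCast]
        · have hc' : ¬ ((k : Int) < (name.length : Int)) := by exact_mod_cast hc
          simp [hc, hc']
      have hX : names.foldl (fun (a : List Char) (name : List Char) =>
            if (k : Int) < (name.length : Int) then a ++ [' ', PySem.List.pyGetD name (k : Int) ' ', ' ']
            else a ++ [' ', ' ', ' ']) (acc ++ "    ".toList)
          = acc ++ "    ".toList ++ names.flatMap
              (fun name => if k < name.length then [' ', name.getD k ' ', ' '] else [' ', ' ', ' ']) := by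
        rw [hfun]
        exact PySem.List.foldl_append_eq_flatMap _ _ _
      by_cases hke : k = n'
      · have hci : ¬ ((k : Int) ≠ (m.length : Int) - 1) := by
          rw [hn', hke]; push_cast; omega
        rw [if_neg hci, hX, hke]
        simp [pvRow, List.append_assoc]
      · have hci : (k : Int) ≠ (m.length : Int) - 1 := by
          rw [hn']
          intro hcontra
          apply hke
          omega
        rw [if_pos hci, hX]
        simp [pvRow, hke, List.append_assoc]
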